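-- pv_equiv track=rewrite | github.com/asotade/MedBioFold | pythonScripts/saveSequenceToText.py | pdbSeq
-- ===== SOURCE A (Python) =====
-- _aa_index = [('ALA', 'A'),
--              ('CYS', 'C'),
--              ('ASP', 'D'),
--              ('GLU', 'E'),
--              ('PHE', 'F'),
--              ('GLY', 'G'),
--              ('HIS', 'H'),
--              ('HSE', 'H'),
--              ('HSD', 'H'),
--              ('ILE', 'I'),
--              ('LYS', 'K'),
--              ('LEU', 'L'),
--              ('MET', 'M'),
--              ('MSE', 'M'),
--              ('ASN', 'N'),
--              ('PRO', 'P'),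
--              ('GLN', 'Q'),
--              ('ARG', 'R'),
--              ('SER', 'S'),
--              ('THR', 'T'),
--              ('VAL', 'V'),
--              ('TRP', 'W'),
--              ('TYR', 'Y')]
--
-- def pdbSeq(pdb, use_atoms=False):
--     # Try using SEQRES
--     seq = [l for l in pdb if l[0:6] == "SEQRES"]
--     if len(seq) != 0 and not use_atoms:
--         seq_type = "SEQRES"
--         chain_dict = dict([(l[11], []) for l in seq])
--         for c in chain_dict.keys():
--             chain_seq = [l[19:70].split() for l in seq if l[11] == c]
--             for x in chain_seq:
--                 chain_dict[c].extend(x)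
--     # Otherwise, use ATOM
--     else:
--         seq_type = "ATOM  "
--         # Check to see if there are multiple models.  If there are, only look
--         # at the first model.
--         models = [i for i, l in enumerate(pdb) if l.startswith("MODEL")]
--         if len(models) > 1:
--             pdb = pdb[models[0]:models[1]]
--             # Grab all CA from ATOM entries, as well as MSE from HETATM
--         atoms = []
--         for l in pdb:
--             if l[0:6] == "ATOM  " and l[13:16] == "CA ":
--                 # Check to see if this is a second conformation of the previous
--                 # atom
--                 if len(atoms) != 0:
--                     if atoms[-1][17:26] == l[17:26]:
--                         continue
--                 atoms.append(l)
--             elif l[0:6] == "HETATM" and l[13:16] == "CA " and l[17:20] == "MSE":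
--                 # Check to see if this is a second conformation of the previous
--                 # atom
--                 if len(atoms) != 0:
--                     if atoms[-1][17:26] == l[17:26]:
--                         continue
--                 atoms.append(l)
--         chain_dict = dict([(l[21], []) for l in atoms])
--         for c in chain_dict.keys():
--             chain_dict[c] = [l[17:20] for l in atoms if l[21] == c]
--     AA3_TO_AA1 = dict(_aa_index)
--     tempchain = chain_dict.keys()
--     seq = ''
--     for i in tempchain:
--         for j in chain_dict[i]:
--             if j in AA3_TO_AA1.keys():
--                 seq = seq + (AA3_TO_AA1[j])
--             else:
--                 seq = seq + ('X')
--     return seq, seq_type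
-- ===== SOURCE B (Python) =====
-- _aa_index = [('ALA', 'A'),
--              ('CYS', 'C'),
--              ('ASP', 'D'),
--              ('GLU', 'E'),
--              ('PHE', 'F'),
--              ('GLY', 'G'),
--              ('HIS', 'H'),
--              ('HSE', 'H'),
--              ('HSD', 'H'),
--              ('ILE', 'I'),
--              ('LYS', 'K'),
--              ('LEU', 'L'),
--              ('MET', 'M'),
--              ('MSE', 'M'),
--              ('ASN', 'N'),
--              ('PRO', 'P'),
--              ('GLN', 'Q'),
--              ('ARG', 'R'),
--              ('SER', 'S'),
--              ('THR', 'T'),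
--              ('VAL', 'V'),
--              ('TRP', 'W'),
--              ('TYR', 'Y')]
--
--
-- def pdbSeq(pdb, use_atoms=False):
--     # Single pass per branch: bucket residues by chain id into an ordered dict,
--     # instead of re-scanning the whole line list once per chain.
--     seqres = [l for l in pdb if l[0:6] == "SEQRES"]
--     if seqres and not use_atoms:
--         seq_type = "SEQRES"
--         buckets = {}
--         for l in seqres:
--             buckets.setdefault(l[11], []).extend(l[19:70].split())
--     else:
--         seq_type = "ATOM  "
--         models = [i for i, l in enumerate(pdb) if l.startswith("MODEL")]
--         if len(models) > 1:
--             pdb = pdb[models[0]:models[1]]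
--         buckets = {}
--         prev = None
--         for l in pdb:
--             if l[13:16] == "CA " and (l[0:6] == "ATOM  " or
--                                       (l[0:6] == "HETATM" and l[17:20] == "MSE")):
--                 if l[17:26] == prev:
--                     continue
--                 prev = l[17:26]
--                 buckets.setdefault(l[21], []).append(l[17:20])
--     aa = dict(_aa_index)
--     return ''.join(aa.get(r, 'X') for rs in buckets.values() for r in rs), seq_type
-- ===== Notes on version B (the rewrite author's own statement) =====
-- stated objective: alternative
-- what changed: A builds the chain key set and then re-scans the whole SEQRES/atom line list once per chain (and builds the final string by repeated concatenation); B buckets residues by chain id into an ordered dict in a single pass over the lines and joins the mapped one-letter codes once.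
import Mathlib
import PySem

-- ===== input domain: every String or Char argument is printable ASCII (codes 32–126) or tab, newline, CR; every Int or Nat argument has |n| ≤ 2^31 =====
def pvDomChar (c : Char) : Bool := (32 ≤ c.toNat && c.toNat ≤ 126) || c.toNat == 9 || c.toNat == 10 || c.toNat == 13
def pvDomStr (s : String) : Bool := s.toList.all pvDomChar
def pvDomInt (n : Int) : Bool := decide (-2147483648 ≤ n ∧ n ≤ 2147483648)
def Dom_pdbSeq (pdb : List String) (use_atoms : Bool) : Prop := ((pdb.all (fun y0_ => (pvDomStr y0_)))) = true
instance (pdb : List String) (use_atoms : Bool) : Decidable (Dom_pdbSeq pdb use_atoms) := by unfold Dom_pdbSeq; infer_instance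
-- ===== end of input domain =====

-- B buckets residues by chain id in one pass over the lines (A re-scans all lines once per chain); return value only, A mutates nothing.

-- shared field accessors (the same slice/index expressions appear verbatim in both Pythons)
def pvAA : List (String × String) :=
  [("ALA", "A"), ("CYS", "C"), ("ASP", "D"), ("GLU", "E"), ("PHE", "F"),
   ("GLY", "G"), ("HIS", "H"), ("HSE", "H"), ("HSD", "H"), ("ILE", "I"),
   ("LYS", "K"), ("LEU", "L"), ("MET", "M"), ("MSE", "M"), ("ASN", "N"),
   ("PRO", "P"), ("GLN", "Q"), ("ARG", "R"), ("SER", "S"), ("THR", "T"),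
   ("VAL", "V"), ("TRP", "W"), ("TYR", "Y")]
def pvRec (l : String) : String := PySem.Str.slice l (some 0) (some 6)      -- l[0:6]
def pvName (l : String) : String := PySem.Str.slice l (some 13) (some 16)   -- l[13:16]
def pvRes (l : String) : String := PySem.Str.slice l (some 17) (some 20)    -- l[17:20]
def pvConf (l : String) : String := PySem.Str.slice l (some 17) (some 26)   -- l[17:26]
-- l[11] / l[21]: a Char; the ' ' default is never reached under Pre_pdbSeq (Python raises IndexError there)
def pvChain11 (l : String) : Char := (PySem.Str.pyGet? l 11).getD ' '
def pvChain21 (l : String) : Char := (PySem.Str.pyGet? l 21).getD ' '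
def pvTokens (l : String) : List String := PySem.Str.split₀ (PySem.Str.slice l (some 19) (some 70))  -- l[19:70].split()

-- ===== PORT A =====
def pdbSeq (pdb : List String) (use_atoms : Bool) : String × String :=
  let seq := pdb.filter (fun l => pvRec l == "SEQRES")
  let res :=
    if seq.length != 0 && !use_atoms then
      -- SEQRES branch: key dict from all lines, then one re-scan of seq per chain
      let chain_dict := PySem.Dict.ofList (seq.map (fun l => (pvChain11 l, ([] : List String))))
      let chain_dict := chain_dict.keys.foldl (fun d c =>
        let chain_seq := (seq.filter (fun l => pvChain11 l == c)).map pvTokens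
        chain_seq.foldl (fun d x => d.modify c [] (fun v => v ++ x)) d) chain_dict
      (chain_dict, "SEQRES")
    else
      let models := ((PySem.List.enumerate pdb 0).filter (fun p => PySem.Str.startswith p.2 "MODEL")).map (fun p => p.1)
      let pdb := if models.length > 1 then
          PySem.List.slice pdb (some (PySem.List.pyGetD models 0 0)) (some (PySem.List.pyGetD models 1 0))
        else pdb
      let atoms := pdb.foldl (fun atoms l =>
        if pvRec l == "ATOM  " && pvName l == "CA " then
          if atoms.length != 0 && (pvConf (PySem.List.pyGetD atoms (-1) "") == pvConf l) then atoms
          else atoms ++ [l]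
        else if pvRec l == "HETATM" && pvName l == "CA " && pvRes l == "MSE" then
          if atoms.length != 0 && (pvConf (PySem.List.pyGetD atoms (-1) "") == pvConf l) then atoms
          else atoms ++ [l]
        else atoms) ([] : List String)
      let chain_dict := PySem.Dict.ofList (atoms.map (fun l => (pvChain21 l, ([] : List String))))
      let chain_dict := chain_dict.keys.foldl (fun d c =>
        d.insert c ((atoms.filter (fun l => pvChain21 l == c)).map pvRes)) chain_dict
      (chain_dict, "ATOM  ")
  let chain_dict := res.1
  let AA3_TO_AA1 := PySem.Dict.ofList pvAA
  let tempchain := chain_dict.keys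
  let sq := tempchain.foldl (fun s c => (chain_dict.getD c []).foldl (fun s j =>
      s ++ (if AA3_TO_AA1.contains j then AA3_TO_AA1.getD j "X" else "X")) s) ""
  (sq, res.2)

-- ===== PORT B =====
def pdbSeq_alt (pdb : List String) (use_atoms : Bool) : String × String :=
  let seqres := pdb.filter (fun l => pvRec l == "SEQRES")
  let res :=
    if seqres.length != 0 && !use_atoms then
      -- single pass: setdefault-style bucketing of the residue tokens by chain id
      (seqres.foldl (fun d l => d.modify (pvChain11 l) [] (fun v => v ++ pvTokens l))
        (PySem.Dict.empty : PySem.Dict Char (List String)), "SEQRES")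
    else
      let models := ((PySem.List.enumerate pdb 0).filter (fun p => PySem.Str.startswith p.2 "MODEL")).map (fun p => p.1)
      let pdb := if models.length > 1 then
          PySem.List.slice pdb (some (PySem.List.pyGetD models 0 0)) (some (PySem.List.pyGetD models 1 0))
        else pdb
      -- one pass collecting (chain, residue) pairs, deduping against the previous kept key
      let st := pdb.foldl (fun (st : Option String × List (Char × String)) l =>
        if pvName l == "CA " && (pvRec l == "ATOM  " || (pvRec l == "HETATM" && pvRes l == "MSE")) then
          if some (pvConf l) == st.1 then st
          else (some (pvConf l), st.2 ++ [(pvChain21 l, pvRes l)])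
        else st) (none, [])
      (st.2.foldl (fun d p => d.modify p.1 [] (fun v => v ++ [p.2]))
        (PySem.Dict.empty : PySem.Dict Char (List String)), "ATOM  ")
  let aa := PySem.Dict.ofList pvAA
  (PySem.Str.join "" (res.1.values.flatMap (fun rs => rs.map (fun r => aa.getD r "X"))), res.2)

-- ===== PRECONDITION & SPEC =====
-- Pre_ excludes exactly the inputs where Python A raises IndexError reading a chain-id column:
-- a SEQRES line shorter than 12 chars (when the SEQRES branch is taken), or a CA/MSE-matched
-- line shorter than 22 chars (ATOM branch).  For simplicity the ATOM condition is required of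
-- every matched line of pdb, although A only reads lines of the first MODEL when several MODEL
-- records exist — a slight narrowing (see claim.json cites).
def Pre_pdbSeq (pdb : List String) (use_atoms : Bool) : Prop :=
  if (∃ l ∈ pdb, pvRec l = "SEQRES") ∧ use_atoms = false then
    ∀ l ∈ pdb, pvRec l = "SEQRES" → 12 ≤ l.toList.length
  else
    ∀ l ∈ pdb, pvName l = "CA " ∧ (pvRec l = "ATOM  " ∨ (pvRec l = "HETATM" ∧ pvRes l = "MSE")) →
      22 ≤ l.toList.length
instance (pdb : List String) (use_atoms : Bool) : Decidable (Pre_pdbSeq pdb use_atoms) := by unfold Pre_pdbSeq; infer_instance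

def pvWitness_pdbSeq : List String × Bool :=
  (["SEQRES  1 A   10  ALA GLY MSE", "SEQRES  1 B   10  TRP ZZZ"], false)

def Spec_pdbSeq (pdb : List String) (use_atoms : Bool) (out : String × String) : Prop := out = pdbSeq_alt pdb use_atoms
instance (pdb : List String) (use_atoms : Bool) (out : String × String) : Decidable (Spec_pdbSeq pdb use_atoms out) := by unfold Spec_pdbSeq; infer_instance

-- ===== CLAIM (what is proved, stated in full; the proofs are below) =====
def Claim_equal_pdbSeq : Prop := ∀ (pdb : List String) (use_atoms : Bool), Dom_pdbSeq pdb use_atoms → Pre_pdbSeq pdb use_atoms → Spec_pdbSeq pdb use_atoms (pdbSeq pdb use_atoms)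

-- ===== LEMMAS AND PROOFS =====

-- the one-letter lookup: A's "if j in keys then d[j] else 'X'" is getD j "X"
theorem pv_lk_eq (aa : PySem.Dict String String) (j : String) :
    (if aa.contains j then aa.getD j "X" else "X") = aa.getD j "X" := by
  by_cases h : aa.contains j = true
  · simp [h]
  · simp only [Bool.not_eq_true] at h
    simp [h, PySem.Dict.getD_of_not_contains _ _ h]

-- foldl of string appends, on the List Char side
theorem pv_foldl_str_toList {γ : Type} (f : γ → String) :
    ∀ (P : List γ) (s : String),
      (P.foldl (fun s j => s ++ f j) s).toList = s.toList ++ (P.map (fun j => (f j).toList)).flatten := by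
  intro P
  induction P with
  | nil => simp
  | cons a t ih => intro s; simp [ih, String.toList_append]

-- outer foldl whose step appends X c on the toList side
theorem pv_foldl_outer_toList (step : String → Char → String) (X : Char → List Char)
    (hstep : ∀ s c, (step s c).toList = s.toList ++ X c) :
    ∀ (S : List Char) (s : String),
      (S.foldl step s).toList = s.toList ++ (S.map X).flatten := by
  intro S
  induction S with
  | nil => simp
  | cons a t ih => intro s; simp [ih, hstep]

-- join with the empty separator is flatten
theorem pv_join_nil (ps : List (List Char)) : PySem.Chars.join [] ps = ps.flatten := by
  simp only [PySem.Chars.join, List.intercalate]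
  induction ps with
  | nil => simp
  | cons a t ih => cases t <;> simp_all [List.intersperse]

-- insert at an existing key keeps the key list
theorem pv_keys_insert_mem (d : PySem.Dict Char (List String)) (k : Char) (v : List String)
    (h : k ∈ d.keys) : (d.insert k v).keys = d.keys := by
  have hc : d.contains k = true := by
    rw [PySem.Dict.contains_eq_decide_mem_keys]; simpa using h
  simp only [PySem.Dict.insert, hc, if_pos, PySem.Dict.keys, List.map_map]
  apply List.map_congr_left
  intro p _
  by_cases hp : p.1 = k
  · simp [hp]
  · simp [hp]

-- inner modify-fold at a fixed key: value there, other keys, key list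
theorem pv_inner_getD (c : Char) :
    ∀ (xs : List (List String)) (d : PySem.Dict Char (List String)),
      (xs.foldl (fun d x => d.modify c [] (fun v => v ++ x)) d).getD c [] = d.getD c [] ++ xs.flatten := by
  intro xs
  induction xs with
  | nil => simp
  | cons a t ih => intro d; simp [ih, PySem.Dict.getD_modify_self]

theorem pv_inner_getD_ne (c c' : Char) (h : c' ≠ c) :
    ∀ (xs : List (List String)) (d : PySem.Dict Char (List String)),
      (xs.foldl (fun d x => d.modify c [] (fun v => v ++ x)) d).getD c' [] = d.getD c' [] := by
  intro xs
  induction xs with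
  | nil => simp
  | cons a t ih => intro d; simp [ih, PySem.Dict.getD_modify_of_ne _ _ _ h]

theorem pv_inner_keys (c : Char) :
    ∀ (xs : List (List String)) (d : PySem.Dict Char (List String)), c ∈ d.keys →
      (xs.foldl (fun d x => d.modify c [] (fun v => v ++ x)) d).keys = d.keys := by
  intro xs
  induction xs with
  | nil => intro d _; rfl
  | cons a t ih =>
    intro d hc
    have hk : (d.modify c [] (fun v => v ++ a)).keys = d.keys := by
      simp only [PySem.Dict.modify]; exact pv_keys_insert_mem _ _ _ hc
    simp only [List.foldl_cons]
    rw [ih _ (by rw [hk]; exact hc), hk]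

-- A's outer SEQRES fold: keys and the value at each key of a Nodup iteration list
theorem pv_outerA_keys (g : Char → List (List String)) :
    ∀ (ks : List Char) (d : PySem.Dict Char (List String)), (∀ c ∈ ks, c ∈ d.keys) →
      (ks.foldl (fun d c => (g c).foldl (fun d x => d.modify c [] (fun v => v ++ x)) d) d).keys = d.keys := by
  intro ks
  induction ks with
  | nil => intro d _; rfl
  | cons a t ih =>
    intro d h
    have hk : ((g a).foldl (fun d x => d.modify a [] (fun v => v ++ x)) d).keys = d.keys :=
      pv_inner_keys a _ d (h a (by simp))
    simp only [List.foldl_cons]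
    rw [ih _ (by rw [hk]; exact fun c hc => h c (by simp [hc])), hk]

theorem pv_outerA_notmem (g : Char → List (List String)) :
    ∀ (ks : List Char) (d : PySem.Dict Char (List String)) (c : Char), c ∉ ks →
      (ks.foldl (fun d c => (g c).foldl (fun d x => d.modify c [] (fun v => v ++ x)) d) d).getD c [] = d.getD c [] := by
  intro ks
  induction ks with
  | nil => intro d c _; rfl
  | cons a t ih =>
    intro d c hc
    simp only [List.mem_cons, not_or] at hc
    simp only [List.foldl_cons]
    rw [ih _ _ hc.2, pv_inner_getD_ne a c hc.1]

theorem pv_outerA_getD (g : Char → List (List String)) :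
    ∀ (ks : List Char) (d : PySem.Dict Char (List String)), ks.Nodup → ∀ c ∈ ks,
      (ks.foldl (fun d c => (g c).foldl (fun d x => d.modify c [] (fun v => v ++ x)) d) d).getD c [] =
        d.getD c [] ++ (g c).flatten := by
  intro ks
  induction ks with
  | nil => intro d _ c hc; cases hc
  | cons a t ih =>
    intro d hnd c hc
    simp only [List.nodup_cons] at hnd
    simp only [List.foldl_cons]
    rcases List.mem_cons.mp hc with rfl | hct
    · rw [pv_outerA_notmem g t _ c hnd.1, pv_inner_getD]
    · have hne : c ≠ a := fun hh => hnd.1 (hh ▸ hct)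
      rw [ih _ hnd.2 c hct, pv_inner_getD_ne a c hne]

-- A's outer ATOM fold (assignment): keys and values
theorem pv_outerAI_notmem (g : Char → List String) :
    ∀ (ks : List Char) (d : PySem.Dict Char (List String)) (c : Char), c ∉ ks →
      (ks.foldl (fun d c => d.insert c (g c)) d).getD c [] = d.getD c [] := by
  intro ks
  induction ks with
  | nil => intro d c _; rfl
  | cons a t ih =>
    intro d c hc
    simp only [List.mem_cons, not_or] at hc
    simp only [List.foldl_cons]
    rw [ih _ _ hc.2, PySem.Dict.getD_insert_of_ne _ _ _ hc.1]

theorem pv_outerAI_getD (g : Char → List String) :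
    ∀ (ks : List Char) (d : PySem.Dict Char (List String)), ks.Nodup → ∀ c ∈ ks,
      (ks.foldl (fun d c => d.insert c (g c)) d).getD c [] = g c := by
  intro ks
  induction ks with
  | nil => intro d _ c hc; cases hc
  | cons a t ih =>
    intro d hnd c hc
    simp only [List.nodup_cons] at hnd
    simp only [List.foldl_cons]
    rcases List.mem_cons.mp hc with rfl | hct
    · rw [pv_outerAI_notmem g t _ c hnd.1, PySem.Dict.getD_insert_self]
    · exact ih _ hnd.2 c hct

theorem pv_outerAI_keys (g : Char → List String) :
    ∀ (ks : List Char) (d : PySem.Dict Char (List String)), (∀ c ∈ ks, c ∈ d.keys) →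
      (ks.foldl (fun d c => d.insert c (g c)) d).keys = d.keys := by
  intro ks
  induction ks with
  | nil => intro d _; rfl
  | cons a t ih =>
    intro d h
    have hk : (d.insert a (g a)).keys = d.keys := pv_keys_insert_mem _ _ _ (h a (by simp))
    simp only [List.foldl_cons]
    rw [ih _ (by rw [hk]; exact fun c hc => h c (by simp [hc])), hk]

-- B's extend-style bucketing fold: the bucket of chain c
theorem pv_extend_getD (key : String → Char) (f : String → List String) (c : Char) :
    ∀ (ls : List String) (d : PySem.Dict Char (List String)),
      (ls.foldl (fun d l => d.modify (key l) [] (fun v => v ++ f l)) d).getD c [] =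
        d.getD c [] ++ ((ls.filter (fun l => key l == c)).map f).flatten := by
  intro ls
  induction ls with
  | nil => simp
  | cons a t ih =>
    intro d
    by_cases h : key a = c
    · subst h; simp [ih, PySem.Dict.getD_modify_self]
    · have h' : c ≠ key a := fun hh => h hh.symm
      simp [ih, PySem.Dict.getD_modify_of_ne _ _ _ h', h]

-- getD / keys of A's const-[] key dict
theorem pv_getD_ofList_nil (ps : List Char) (c : Char) :
    (PySem.Dict.ofList (ps.map (fun k => (k, ([] : List String))))).getD c [] = [] := by
  suffices h : ∀ (qs : List (Char × List String)) (d : PySem.Dict Char (List String)),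
      (∀ k, d.getD k [] = []) → (∀ q ∈ qs, q.2 = []) → (d.update qs).getD c [] = [] by
    exact h _ _ (fun k => PySem.Dict.getD_empty k []) (by simp)
  intro qs
  induction qs with
  | nil => intro d hd _; exact hd c
  | cons a t ih =>
    intro d hd hq
    simp only [PySem.Dict.update, List.foldl_cons]
    have : ∀ k, (d.insert a.1 a.2).getD k [] = [] := by
      intro k
      by_cases hk : k = a.1
      · subst hk; rw [PySem.Dict.getD_insert_self]; exact (hq a (by simp)).symm ▸ rfl
      · rw [PySem.Dict.getD_insert_of_ne _ _ _ hk]; exact hd k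
    exact ih _ this (fun q hqt => hq q (by simp [hqt]))

theorem pv_keys_ofList (ps : List Char) :
    (PySem.Dict.ofList (ps.map (fun k => (k, ([] : List String))))).keys = PySem.Set.update [] ps := by
  have := PySem.Dict.keys_foldl_insert_key (ps.map (fun k => (k, ([] : List String))))
      (fun p => p.1) (fun _ p => p.2) PySem.Dict.empty
  rw [PySem.Dict.ofList, PySem.Dict.update, this]; simp [Function.comp_def]

-- the shared tail: equal Nodup keys and equal buckets give A's string = B's string
theorem pv_final (dA dB : PySem.Dict Char (List String))
    (hk : dA.keys = dB.keys) (hnd : dB.keys.Nodup)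
    (hg : ∀ c ∈ dB.keys, dA.getD c [] = dB.getD c []) :
    (dA.keys.foldl (fun s c => (dA.getD c []).foldl (fun s j =>
        s ++ (if (PySem.Dict.ofList pvAA).contains j then (PySem.Dict.ofList pvAA).getD j "X" else "X")) s) "") =
    PySem.Str.join "" (dB.values.flatMap (fun rs => rs.map (fun r => (PySem.Dict.ofList pvAA).getD r "X"))) := by
  apply String.toList_inj.mp
  rw [pv_foldl_outer_toList _
      (fun c => ((dA.getD c []).map (fun j => ((PySem.Dict.ofList pvAA).getD j "X").toList)).flatten)
      (fun s c => by rw [pv_foldl_str_toList]; simp only [pv_lk_eq])]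
  rw [PySem.Str.toList_join]
  simp only [String.toList_empty, List.nil_append]
  rw [pv_join_nil]
  rw [PySem.Dict.values_eq_map_keys dB hnd [], hk]
  simp only [List.flatMap_def, List.map_flatten, List.map_map, Function.comp_def]
  rw [List.flatten_flatten]
  simp only [List.map_map, Function.comp_def]
  congr 1
  apply List.map_congr_left
  intro c hc
  rw [hg c hc]

-- A's dedup test of the previous atom equals B's tracked previous key
theorem pv_dup_eq (atoms : List String) (l : String) :
    (atoms.length != 0 && (pvConf (PySem.List.pyGetD atoms (-1) "") == pvConf l)) =
    (some (pvConf l) == atoms.getLast?.map pvConf) := by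
  cases h : atoms.getLast? with
  | none => simp [List.getLast?_eq_none_iff.mp h]
  | some a =>
    have hne : atoms ≠ [] := by rintro rfl; simp at h
    rw [PySem.List.pyGetD_neg_one atoms "" hne]
    rw [List.getLast?_eq_some_getLast hne] at h
    simp only [Option.some.injEq] at h
    rw [h]
    have hlen : (atoms.length != 0) = true := by
      simpa [bne_iff_ne, List.length_eq_zero_iff] using hne
    rw [hlen, Bool.true_and]
    simp [eq_comm]

-- one step of B's pair loop tracks one step of A's atoms loop
theorem pv_step_eq (atoms : List String) (l : String) :
    (if pvName l == "CA " && (pvRec l == "ATOM  " || (pvRec l == "HETATM" && pvRes l == "MSE")) then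
        if some (pvConf l) == (atoms.getLast?.map pvConf, atoms.map (fun l => (pvChain21 l, pvRes l))).1 then
          (atoms.getLast?.map pvConf, atoms.map (fun l => (pvChain21 l, pvRes l)))
        else (some (pvConf l), (atoms.getLast?.map pvConf, atoms.map (fun l => (pvChain21 l, pvRes l))).2 ++ [(pvChain21 l, pvRes l)])
      else (atoms.getLast?.map pvConf, atoms.map (fun l => (pvChain21 l, pvRes l)))) =
    (let A := if pvRec l == "ATOM  " && pvName l == "CA " then
          if atoms.length != 0 && (pvConf (PySem.List.pyGetD atoms (-1) "") == pvConf l) then atoms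
          else atoms ++ [l]
        else if pvRec l == "HETATM" && pvName l == "CA " && pvRes l == "MSE" then
          if atoms.length != 0 && (pvConf (PySem.List.pyGetD atoms (-1) "") == pvConf l) then atoms
          else atoms ++ [l]
        else atoms
     (A.getLast?.map pvConf, A.map (fun l => (pvChain21 l, pvRes l)))) := by
  simp only [pv_dup_eq]
  by_cases h1 : (pvRec l == "ATOM  ") = true <;>
  by_cases h2 : (pvName l == "CA ") = true <;>
  by_cases h3 : (pvRec l == "HETATM") = true <;>
  by_cases h4 : (pvRes l == "MSE") = true <;>
  by_cases h5 : (some (pvConf l) == atoms.getLast?.map pvConf) = true <;>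
  simp_all <;>
  · have hcond : ¬ (∃ a, atoms.getLast? = some a ∧ pvConf a = pvConf l) := by
      rintro ⟨a, ha, hc⟩; exact h5 a ha hc
    simp [hcond, h4]

-- B's pair loop tracks exactly A's atoms loop
theorem pv_atoms_pairs :
    ∀ (pdb1 : List String) (atoms : List String),
      (pdb1.foldl (fun (st : Option String × List (Char × String)) l =>
        if pvName l == "CA " && (pvRec l == "ATOM  " || (pvRec l == "HETATM" && pvRes l == "MSE")) then
          if some (pvConf l) == st.1 then st
          else (some (pvConf l), st.2 ++ [(pvChain21 l, pvRes l)])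
        else st) (atoms.getLast?.map pvConf, atoms.map (fun l => (pvChain21 l, pvRes l)))) =
      (let A := pdb1.foldl (fun atoms l =>
        if pvRec l == "ATOM  " && pvName l == "CA " then
          if atoms.length != 0 && (pvConf (PySem.List.pyGetD atoms (-1) "") == pvConf l) then atoms
          else atoms ++ [l]
        else if pvRec l == "HETATM" && pvName l == "CA " && pvRes l == "MSE" then
          if atoms.length != 0 && (pvConf (PySem.List.pyGetD atoms (-1) "") == pvConf l) then atoms
          else atoms ++ [l]
        else atoms) atoms
       (A.getLast?.map pvConf, A.map (fun l => (pvChain21 l, pvRes l)))) := by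
  intro pdb1
  induction pdb1 with
  | nil => intro atoms; simp
  | cons l t ih =>
    intro atoms
    simp only [List.foldl_cons]
    rw [pv_step_eq atoms l]
    simp only []
    exact ih _

theorem pv_main (pdb : List String) (use_atoms : Bool) : pdbSeq pdb use_atoms = pdbSeq_alt pdb use_atoms := by
  unfold pdbSeq pdbSeq_alt
  by_cases hcond : ((pdb.filter (fun l => pvRec l == "SEQRES")).length != 0 && !use_atoms) = true
  · simp only [hcond, if_true]
    simp only [Prod.mk.injEq]
    refine ⟨?_, trivial⟩
    set seqL := List.filter (fun l => pvRec l == "SEQRES") pdb with hseqL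
    set d0 := PySem.Dict.ofList (seqL.map (fun l => (pvChain11 l, ([] : List String)))) with hd0
    set g : Char → List (List String) := fun c => (seqL.filter (fun l => pvChain11 l == c)).map pvTokens with hgdef
    set dA := List.foldl (fun d c => List.foldl (fun d x => d.modify c [] fun v => v ++ x) d (g c)) d0 d0.keys with hdA
    set dB := List.foldl (fun d l => d.modify (pvChain11 l) [] fun v => v ++ pvTokens l) PySem.Dict.empty seqL with hdB
    have hd0' : d0 = PySem.Dict.ofList ((seqL.map pvChain11).map (fun k => (k, ([] : List String)))) := by
      rw [hd0, List.map_map]; rfl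
    have hkB : dB.keys = PySem.Set.update [] (seqL.map pvChain11) := by
      rw [hdB, PySem.Dict.keys_foldl_modify_key seqL pvChain11 [] (fun _ l v => v ++ pvTokens l) PySem.Dict.empty]
      rfl
    have hk0 : d0.keys = PySem.Set.update [] (seqL.map pvChain11) := by
      rw [hd0', pv_keys_ofList]
    have hndB : dB.keys.Nodup := by
      rw [hdB]
      exact PySem.Dict.nodup_keys_foldl_modify_key seqL pvChain11 [] (fun _ l v => v ++ pvTokens l) PySem.Dict.empty List.nodup_nil
    have hkA : dA.keys = d0.keys := pv_outerA_keys g d0.keys d0 (fun c hc => hc)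
    have hgA : ∀ c ∈ dB.keys, dA.getD c [] = dB.getD c [] := by
      intro c hc
      have hc0 : c ∈ d0.keys := by rw [hk0, ← hkB]; exact hc
      have hnd0 : d0.keys.Nodup := by rw [hk0, ← hkB]; exact hndB
      rw [hdA, pv_outerA_getD g d0.keys d0 hnd0 c hc0]
      rw [hd0', pv_getD_ofList_nil, List.nil_append]
      rw [hdB, pv_extend_getD pvChain11 pvTokens c seqL PySem.Dict.empty]
      rw [PySem.Dict.getD_empty, List.nil_append]
    exact pv_final dA dB (hkA.trans (hk0.trans hkB.symm)) hndB hgA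
  · simp only [hcond, if_false, Bool.false_eq_true]
    simp only [Prod.mk.injEq]
    refine ⟨?_, trivial⟩
    set models := List.map (fun p => p.1) (List.filter (fun p => PySem.Str.startswith p.2 "MODEL") (PySem.List.enumerate pdb)) with hmodels
    set pdb1 := (if models.length > 1 then
        PySem.List.slice pdb (some (PySem.List.pyGetD models 0 0)) (some (PySem.List.pyGetD models 1 0))
      else pdb) with hpdb1
    set atomsL := List.foldl (fun atoms l =>
        if (pvRec l == "ATOM  " && pvName l == "CA ") = true then
          if (atoms.length != 0 && pvConf (PySem.List.pyGetD atoms (-1) "") == pvConf l) = true then atoms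
          else atoms ++ [l]
        else
          if (pvRec l == "HETATM" && pvName l == "CA " && pvRes l == "MSE") = true then
            if (atoms.length != 0 && pvConf (PySem.List.pyGetD atoms (-1) "") == pvConf l) = true then atoms
            else atoms ++ [l]
          else atoms) [] pdb1 with hatomsL
    set stB := List.foldl (fun (st : Option String × List (Char × String)) l =>
        if (pvName l == "CA " && (pvRec l == "ATOM  " || (pvRec l == "HETATM" && pvRes l == "MSE"))) = true then
          if (some (pvConf l) == st.1) = true then st
          else (some (pvConf l), st.2 ++ [(pvChain21 l, pvRes l)])
        else st) (none, []) pdb1 with hstB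
    have hst : stB = (atomsL.getLast?.map pvConf, atomsL.map (fun l => (pvChain21 l, pvRes l))) := by
      rw [hstB, hatomsL]
      simpa using pv_atoms_pairs pdb1 []
    set pairsL := atomsL.map (fun l => (pvChain21 l, pvRes l)) with hpairsL
    set d0 := PySem.Dict.ofList (atomsL.map (fun l => (pvChain21 l, ([] : List String)))) with hd0
    set g : Char → List String := fun c => (atomsL.filter (fun l => pvChain21 l == c)).map pvRes with hgdef
    set dA := List.foldl (fun d c => d.insert c (g c)) d0 d0.keys with hdA
    set dB := List.foldl (fun d p => d.modify p.1 [] fun v => v ++ [p.2]) PySem.Dict.empty stB.2 with hdB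
    have hd0' : d0 = PySem.Dict.ofList ((atomsL.map pvChain21).map (fun k => (k, ([] : List String)))) := by
      rw [hd0, List.map_map]; rfl
    have hdB' : dB = List.foldl (fun d p => d.modify p.1 [] fun v => v ++ [p.2]) PySem.Dict.empty pairsL := by
      rw [hdB, hst]
    have hkB : dB.keys = PySem.Set.update [] (atomsL.map pvChain21) := by
      rw [hdB', PySem.Dict.keys_foldl_modify_key pairsL (fun p => p.1) [] (fun _ p v => v ++ [p.2]) PySem.Dict.empty]
      rw [hpairsL, List.map_map]
      rfl
    have hk0 : d0.keys = PySem.Set.update [] (atomsL.map pvChain21) := by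
      rw [hd0', pv_keys_ofList]
    have hndB : dB.keys.Nodup := by
      rw [hdB']
      exact PySem.Dict.nodup_keys_foldl_modify_key pairsL (fun p => p.1) [] (fun _ p v => v ++ [p.2]) PySem.Dict.empty List.nodup_nil
    have hkA : dA.keys = d0.keys := pv_outerAI_keys g d0.keys d0 (fun c hc => hc)
    have hgA : ∀ c ∈ dB.keys, dA.getD c [] = dB.getD c [] := by
      intro c hc
      have hc0 : c ∈ d0.keys := by rw [hk0, ← hkB]; exact hc
      have hnd0 : d0.keys.Nodup := by rw [hk0, ← hkB]; exact hndB
      rw [hdA, pv_outerAI_getD g d0.keys d0 hnd0 c hc0]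
      rw [hdB', PySem.Dict.getD_foldl_modify_append pairsL PySem.Dict.empty c]
      rw [PySem.Dict.getD_empty, List.nil_append]
      rw [hpairsL, hgdef]
      simp [List.filter_map, List.map_map, Function.comp_def]
    exact pv_final dA dB (hkA.trans (hk0.trans hkB.symm)) hndB hgA

-- ===== VERDICT (by name: the statement is the Claim_ definition above) =====
theorem pdbSeq_spec : Claim_equal_pdbSeq := by
  intro pdb use_atoms _ _
  unfold Spec_pdbSeq
  exact pv_main pdb use_atoms
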